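-- pv_equiv track=rewrite | github.com/fufufukakaka/poke_battle_logger | poke_battle_logger/batch/frame_compressor.py | frame_compress
-- ===== SOURCE A (Python) =====
-- from typing import List
--
-- FRAME_SEQUENCE_THRESHOLD = 100
--
-- def frame_compress(
--     target_frames: List[int],
--     frame_threshold: int = FRAME_SEQUENCE_THRESHOLD,
--     ignore_short_frames: bool = False,
-- ) -> List[List[int]]:
--     # フレームを連続区間で分割する
--     compressed_frame_results: List[List[int]] = []
--     temp = []
--     for i in range(len(target_frames)):
--         temp.append(target_frames[i])
--         if (
--             i < len(target_frames) - 1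
--             and target_frames[i + 1] - target_frames[i] > frame_threshold
--         ):
--             if ignore_short_frames:
--                 if len(temp) > 1:
--                     compressed_frame_results.append(temp)
--                 else:
--                     pass
--             else:
--                 compressed_frame_results.append(temp)
--             temp = []
--     return compressed_frame_results
-- ===== SOURCE B (Python) =====
-- from typing import List
--
-- FRAME_SEQUENCE_THRESHOLD = 100
--
-- def frame_compress(
--     target_frames: List[int],
--     frame_threshold: int = FRAME_SEQUENCE_THRESHOLD,
--     ignore_short_frames: bool = False,
-- ) -> List[List[int]]:
--     # Two-phase decomposition: first find the cut positions (gaps above the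
--     # threshold), then emit the slice between consecutive cuts.  The tail
--     # after the last cut is intentionally not emitted, matching A.
--     cuts = [
--         i
--         for i in range(len(target_frames) - 1)
--         if target_frames[i + 1] - target_frames[i] > frame_threshold
--     ]
--     result: List[List[int]] = []
--     start = 0
--     for c in cuts:
--         seg = target_frames[start : c + 1]
--         if not ignore_short_frames or len(seg) > 1:
--             result.append(seg)
--         start = c + 1
--     return result
-- ===== Notes on version B (the rewrite author's own statement) =====
-- stated objective: alternative
-- what changed: A builds segments in one pass with a mutable temp accumulator emitted at each gap; B first computes the list of cut indices (gaps above the threshold) and then emits the slice between consecutive cuts, so no running segment buffer is maintained.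
import Mathlib
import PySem

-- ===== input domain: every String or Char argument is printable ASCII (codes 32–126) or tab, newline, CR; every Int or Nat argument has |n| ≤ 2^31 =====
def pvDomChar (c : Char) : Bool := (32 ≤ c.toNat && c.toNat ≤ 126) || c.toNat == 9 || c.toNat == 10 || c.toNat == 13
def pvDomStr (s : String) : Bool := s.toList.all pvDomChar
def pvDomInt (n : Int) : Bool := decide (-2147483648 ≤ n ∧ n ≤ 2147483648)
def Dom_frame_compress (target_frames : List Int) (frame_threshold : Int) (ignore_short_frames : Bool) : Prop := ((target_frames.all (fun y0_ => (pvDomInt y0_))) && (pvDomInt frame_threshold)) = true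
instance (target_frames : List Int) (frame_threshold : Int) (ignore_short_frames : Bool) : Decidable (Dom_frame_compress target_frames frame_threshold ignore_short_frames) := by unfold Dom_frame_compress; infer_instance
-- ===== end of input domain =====

-- B replaces A's single-pass accumulator loop by a two-phase decomposition
-- (collect the cut indices, then slice between consecutive cuts); objective: alternative.

-- ===== PORT A =====
-- loop body of A's for-loop: state = (compressed_frame_results, temp).
-- tf[i] on an in-range natural index is ported exactly by getD.
def pvStepA (tf : List Int) (thr : Int) (ig : Bool)
    (st : List (List Int) × List Int) (i : Nat) : List (List Int) × List Int :=
  if i < tf.length - 1 ∧ tf.getD (i + 1) 0 - tf.getD i 0 > thr then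
    ((if ig then
        (if (st.2 ++ [tf.getD i 0]).length > 1 then st.1 ++ [st.2 ++ [tf.getD i 0]] else st.1)
      else st.1 ++ [st.2 ++ [tf.getD i 0]]), [])
  else (st.1, st.2 ++ [tf.getD i 0])

def frame_compress (target_frames : List Int) (frame_threshold : Int) (ignore_short_frames : Bool) : List (List Int) :=
  ((List.range target_frames.length).foldl
    (pvStepA target_frames frame_threshold ignore_short_frames) ([], [])).1

-- ===== PORT B =====
-- loop body of B's second phase: state = (result, start).
def pvStepB (tf : List Int) (ig : Bool)
    (st : List (List Int) × Nat) (c : Nat) : List (List Int) × Nat :=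
  ((if !ig || (PySem.List.slice tf (some (st.2 : Int)) (some ((c : Int) + 1))).length > 1 then
      st.1 ++ [PySem.List.slice tf (some (st.2 : Int)) (some ((c : Int) + 1))]
    else st.1), c + 1)

def frame_compress_alt (target_frames : List Int) (frame_threshold : Int) (ignore_short_frames : Bool) : List (List Int) :=
  let cuts := (List.range (target_frames.length - 1)).filter
    (fun i => target_frames.getD (i + 1) 0 - target_frames.getD i 0 > frame_threshold)
  (cuts.foldl (pvStepB target_frames ignore_short_frames) ([], 0)).1

-- ===== PRECONDITION & SPEC =====
def Spec_frame_compress (target_frames : List Int) (frame_threshold : Int) (ignore_short_frames : Bool) (out : List (List Int)) : Prop := out = frame_compress_alt target_frames frame_threshold ignore_short_frames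
instance (target_frames : List Int) (frame_threshold : Int) (ignore_short_frames : Bool) (out : List (List Int)) : Decidable (Spec_frame_compress target_frames frame_threshold ignore_short_frames out) := by unfold Spec_frame_compress; infer_instance

-- ===== CLAIM (what is proved, stated in full; the proofs are below) =====
def Claim_equal_frame_compress : Prop := ∀ (target_frames : List Int) (frame_threshold : Int) (ignore_short_frames : Bool), Dom_frame_compress target_frames frame_threshold ignore_short_frames → Spec_frame_compress target_frames frame_threshold ignore_short_frames (frame_compress target_frames frame_threshold ignore_short_frames)

-- ===== LEMMAS AND PROOFS =====

-- common emission test: keep a finished segment?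
def pvKeep (ig : Bool) (t : List Int) : Bool := !ig || decide (t.length > 1)

-- reference segmentation: pending prefix `temp`, remaining list; the
-- trailing pending segment is dropped (as both programs do).
def pvSegs (thr : Int) (ig : Bool) : List Int → List Int → List (List Int)
  | _temp, [] => []
  | _temp, [_x] => []
  | temp, x :: y :: rest =>
    if y - x > thr then
      (if pvKeep ig (temp ++ [x]) then [temp ++ [x]] else []) ++ pvSegs thr ig [] (y :: rest)
    else
      pvSegs thr ig (temp ++ [x]) (y :: rest)

theorem pvEmitA_eq (ig : Bool) (acc : List (List Int)) (t : List Int) :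
    (if ig then (if t.length > 1 then acc ++ [t] else acc) else acc ++ [t])
      = acc ++ (if pvKeep ig t then [t] else []) := by
  cases ig <;> simp [pvKeep] <;> split_ifs <;> simp

theorem pvStepA_cut (tf : List Int) (thr : Int) (ig : Bool)
    (acc : List (List Int)) (temp : List Int) (i : Nat)
    (h : i < tf.length - 1 ∧ tf.getD (i + 1) 0 - tf.getD i 0 > thr) :
    pvStepA tf thr ig (acc, temp) i
      = (acc ++ (if pvKeep ig (temp ++ [tf.getD i 0]) then [temp ++ [tf.getD i 0]] else []), []) := by
  unfold pvStepA
  rw [if_pos h, pvEmitA_eq]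

theorem pvStepA_nocut (tf : List Int) (thr : Int) (ig : Bool)
    (acc : List (List Int)) (temp : List Int) (i : Nat)
    (h : ¬ (i < tf.length - 1 ∧ tf.getD (i + 1) 0 - tf.getD i 0 > thr)) :
    pvStepA tf thr ig (acc, temp) i = (acc, temp ++ [tf.getD i 0]) := by
  unfold pvStepA
  rw [if_neg h]

theorem pvGetD_drop (tf : List Int) (s k : Nat) :
    tf.getD (s + k) 0 = (tf.drop s).getD k 0 := by
  simp [List.getD, List.getElem?_drop]

theorem pvLemA (tf : List Int) (thr : Int) (ig : Bool) :
    ∀ (m s : Nat) (acc : List (List Int)) (temp : List Int), s + m = tf.length →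
    ((List.range' s m).foldl (pvStepA tf thr ig) (acc, temp)).1
      = acc ++ pvSegs thr ig temp (tf.drop s) := by
  intro m
  induction m with
  | zero =>
    intro s acc temp hs
    have h0 : tf.drop s = [] := List.drop_eq_nil_of_le (by omega)
    rw [h0]
    simp [pvSegs]
  | succ k ih =>
    intro s acc temp hs
    have hslt : s < tf.length := by omega
    obtain ⟨x, rest, hx⟩ : ∃ x rest, tf.drop s = x :: rest := by
      cases h : tf.drop s with
      | nil => exfalso; have := List.length_drop (l := tf) (i := s); rw [h] at this; simp at this; omega
      | cons a b => exact ⟨a, b, rfl⟩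
    have hgx : tf.getD s 0 = x := by
      have := pvGetD_drop tf s 0
      simpa [hx] using this
    have hdrop1 : tf.drop (s + 1) = rest := by
      have h2 : tf.drop (s + 1) = (tf.drop s).drop 1 := by rw [← List.drop_drop]
      simpa [hx] using h2
    rw [List.range'_succ, List.foldl_cons]
    by_cases hlast : s < tf.length - 1
    · obtain ⟨y, rest', hy⟩ : ∃ y rest', rest = y :: rest' := by
        cases h : rest with
        | nil =>
          exfalso
          have := List.length_drop (l := tf) (i := s)
          rw [hx, h] at this; simp at this; omega
        | cons a b => exact ⟨a, b, rfl⟩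
      have hgy : tf.getD (s + 1) 0 = y := by
        have h3 := pvGetD_drop tf (s + 1) 0
        rw [hdrop1, hy] at h3
        simpa using h3
      by_cases hgap : tf.getD (s + 1) 0 - tf.getD s 0 > thr
      · rw [pvStepA_cut tf thr ig acc temp s ⟨hlast, hgap⟩]
        rw [ih (s + 1) _ [] (by omega)]
        rw [hx, hy, pvSegs]
        rw [hgx, hgy] at hgap
        rw [if_pos hgap, hdrop1, hy, hgx]
        simp
      · rw [pvStepA_nocut tf thr ig acc temp s (by intro hc; exact hgap hc.2)]
        rw [ih (s + 1) _ _ (by omega)]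
        rw [hx, hy, pvSegs]
        rw [hgx, hgy] at hgap
        rw [if_neg hgap, hdrop1, hy, hgx]
    · -- s = tf.length - 1 : last element, no cut check, loop ends
      have hk : k = 0 := by omega
      have hrest : rest = [] := by
        have := List.length_drop (l := tf) (i := s)
        rw [hx] at this; simp at this
        have h4 : rest.length = 0 := by omega
        simpa [List.length_eq_zero_iff] using h4
      rw [pvStepA_nocut tf thr ig acc temp s (by intro hc; exact hlast hc.1)]
      subst hk
      rw [hx, hrest]
      simp [pvSegs]

def pvCutsGe (tf : List Int) (thr : Int) (s : Nat) : List Nat :=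
  (List.range' s (tf.length - 1 - s)).filter
    (fun i => tf.getD (i + 1) 0 - tf.getD i 0 > thr)

theorem pvCutsGe_zero (tf : List Int) (thr : Int) :
    (List.range (tf.length - 1)).filter
      (fun i => tf.getD (i + 1) 0 - tf.getD i 0 > thr) = pvCutsGe tf thr 0 := by
  simp [pvCutsGe, List.range_eq_range']

theorem pvCutsGe_step (tf : List Int) (thr : Int) (s : Nat) (h : s < tf.length - 1) :
    pvCutsGe tf thr s =
      (if tf.getD (s + 1) 0 - tf.getD s 0 > thr then [s] else []) ++ pvCutsGe tf thr (s + 1) := by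
  unfold pvCutsGe
  have hn : tf.length - 1 - s = (tf.length - 1 - (s + 1)) + 1 := by omega
  rw [hn, List.range'_succ]
  by_cases hg : tf.getD (s + 1) 0 - tf.getD s 0 > thr
  all_goals simp only [List.getD] at hg
  · simp [List.filter_cons, hg]
  · simp [hg]

theorem pvCutsGe_nil (tf : List Int) (thr : Int) (s : Nat) (h : tf.length - 1 ≤ s) :
    pvCutsGe tf thr s = [] := by
  unfold pvCutsGe
  have h0 : tf.length - 1 - s = 0 := by omega
  simp [h0]

theorem pvTake_succ_getD (l : List Int) (k : Nat) (hk : k < l.length) :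
    l.take (k + 1) = l.take k ++ [l.getD k 0] := by
  rw [List.take_add_one]
  simp [List.getD, List.getElem?_eq_getElem hk]

theorem pvStepB_eq (tf : List Int) (ig : Bool) (acc : List (List Int)) (start c : Nat) :
    pvStepB tf ig (acc, start) c
      = (acc ++ (if pvKeep ig ((tf.drop start).take (c + 1 - start)) then
                   [(tf.drop start).take (c + 1 - start)] else []), c + 1) := by
  unfold pvStepB
  have hseg : PySem.List.slice tf (some (start : Int)) (some ((c : Int) + 1))
      = (tf.drop start).take (c + 1 - start) := by
    have hc : ((c : Int) + 1) = ((c + 1 : Nat) : Int) := by push_cast; ring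
    rw [hc, PySem.List.slice_natCast]
  rw [hseg]
  cases ig <;> simp [pvKeep] <;> split_ifs <;> simp

theorem pvLemB (tf : List Int) (thr : Int) (ig : Bool) :
    ∀ (m s : Nat) (acc : List (List Int)) (start : Nat), s + m = tf.length → start ≤ s →
    ((pvCutsGe tf thr s).foldl (pvStepB tf ig) (acc, start)).1
      = acc ++ pvSegs thr ig ((tf.drop start).take (s - start)) (tf.drop s) := by
  intro m
  induction m with
  | zero =>
    intro s acc start hs hstart
    rw [pvCutsGe_nil tf thr s (by omega)]
    have h0 : tf.drop s = [] := List.drop_eq_nil_of_le (by omega)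
    rw [h0]
    simp [pvSegs]
  | succ k ih =>
    intro s acc start hs hstart
    have hslt : s < tf.length := by omega
    obtain ⟨x, rest, hx⟩ : ∃ x rest, tf.drop s = x :: rest := by
      cases h : tf.drop s with
      | nil => exfalso; have := List.length_drop (l := tf) (i := s); rw [h] at this; simp at this; omega
      | cons a b => exact ⟨a, b, rfl⟩
    have hgx : tf.getD s 0 = x := by
      have := pvGetD_drop tf s 0
      simpa [hx] using this
    have hdrop1 : tf.drop (s + 1) = rest := by
      have h2 : tf.drop (s + 1) = (tf.drop s).drop 1 := by rw [← List.drop_drop]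
      simpa [hx] using h2
    have htemp : (tf.drop start).take (s - start) ++ [x] = (tf.drop start).take (s + 1 - start) := by
      have hlen : s - start < (tf.drop start).length := by
        rw [List.length_drop]; omega
      have h5 := pvTake_succ_getD (tf.drop start) (s - start) hlen
      rw [← pvGetD_drop tf start (s - start)] at h5
      have harg : start + (s - start) = s := by omega
      rw [harg, hgx] at h5
      rw [← h5]
      congr 1
      omega
    by_cases hlast : s < tf.length - 1
    · obtain ⟨y, rest', hy⟩ : ∃ y rest', rest = y :: rest' := by
        cases h : rest with
        | nil =>
          exfalso
          have := List.length_drop (l := tf) (i := s)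
          rw [hx, h] at this; simp at this; omega
        | cons a b => exact ⟨a, b, rfl⟩
      have hgy : tf.getD (s + 1) 0 = y := by
        have h3 := pvGetD_drop tf (s + 1) 0
        rw [hdrop1, hy] at h3
        simpa using h3
      rw [pvCutsGe_step tf thr s hlast]
      by_cases hgap : tf.getD (s + 1) 0 - tf.getD s 0 > thr
      · rw [if_pos hgap]
        rw [List.cons_append, List.nil_append, List.foldl_cons]
        rw [pvStepB_eq tf ig acc start s]
        rw [ih (s + 1) _ (s + 1) (by omega) (le_refl _)]
        rw [hx, hy, pvSegs]
        rw [hgx, hgy] at hgap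
        rw [if_pos hgap, hdrop1, hy]
        rw [← htemp]
        simp
      · rw [if_neg hgap, List.nil_append]
        rw [ih (s + 1) _ start (by omega) (by omega)]
        rw [hx, hy, pvSegs]
        rw [hgx, hgy] at hgap
        rw [if_neg hgap, hdrop1, hy, htemp]
    · rw [pvCutsGe_nil tf thr s (by omega)]
      have hrest : rest = [] := by
        have := List.length_drop (l := tf) (i := s)
        rw [hx] at this; simp at this
        have h4 : rest.length = 0 := by omega
        simpa [List.length_eq_zero_iff] using h4
      rw [hx, hrest]
      simp [pvSegs]

-- ===== VERDICT (by name: the statement is the Claim_ definition above) =====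
theorem frame_compress_spec : Claim_equal_frame_compress := by
  intro tf thr ig _
  unfold Spec_frame_compress frame_compress frame_compress_alt
  rw [List.range_eq_range']
  have hA := pvLemA tf thr ig tf.length 0 [] [] (by omega)
  simp only [List.drop_zero, List.nil_append] at hA
  rw [hA, pvCutsGe_zero]
  have hB := pvLemB tf thr ig tf.length 0 [] 0 (by omega) (le_refl _)
  simp only [List.drop_zero, List.take_zero, List.nil_append, Nat.sub_zero] at hB
  rw [hB]
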